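-- pv_equiv track=rewrite | github.com/mxhxl/scholarsync | backend/app/tasks/paper_tasks.py | _match_followed_author
-- ===== SOURCE A (Python) =====
-- def _match_followed_author(
--     paper_authors: list[str], followed_authors: list[str]
-- ) -> str | None:
--     """Return the first followed author that matches any paper author (case-insensitive)."""
--     followed_lower = {a.lower(): a for a in followed_authors}
--     for author in paper_authors:
--         key = author.lower().strip()
--         if key in followed_lower:
--             return followed_lower[key]
--     return None
-- ===== SOURCE B (Python) =====
-- def _match_followed_author(
--     paper_authors: list[str], followed_authors: list[str]
-- ) -> str | None:
--     """Return the followed author matching the earliest paper author (case-insensitive)."""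
--     pos = {}  # normalized paper author -> earliest position
--     for i, a in enumerate(paper_authors):
--         pos.setdefault(a.lower().strip(), i)
--     best = None  # (position, followed author)
--     for f in followed_authors:
--         i = pos.get(f.lower())
--         if i is not None and (best is None or i < best[0]):
--             best = (i, f)
--     return best[1] if best is not None else None
-- ===== Notes on version B (the rewrite author's own statement) =====
-- stated objective: alternative
-- what changed: B inverts the traversal: instead of a lowercase dict over followed authors scanned by paper authors, it indexes each normalized paper author's earliest position once and then scans followed authors, returning the one with the minimal position; Pre_ excludes followed lists with two distinct entries equal after lowercasing, where A's dict keeps the last duplicate (an accident of dict re-insertion) while B keeps the first.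
-- outside the precondition, e.g. on _match_followed_author(['a'], ['A', 'a']): A returns 'a', B returns 'A'
import Mathlib
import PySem

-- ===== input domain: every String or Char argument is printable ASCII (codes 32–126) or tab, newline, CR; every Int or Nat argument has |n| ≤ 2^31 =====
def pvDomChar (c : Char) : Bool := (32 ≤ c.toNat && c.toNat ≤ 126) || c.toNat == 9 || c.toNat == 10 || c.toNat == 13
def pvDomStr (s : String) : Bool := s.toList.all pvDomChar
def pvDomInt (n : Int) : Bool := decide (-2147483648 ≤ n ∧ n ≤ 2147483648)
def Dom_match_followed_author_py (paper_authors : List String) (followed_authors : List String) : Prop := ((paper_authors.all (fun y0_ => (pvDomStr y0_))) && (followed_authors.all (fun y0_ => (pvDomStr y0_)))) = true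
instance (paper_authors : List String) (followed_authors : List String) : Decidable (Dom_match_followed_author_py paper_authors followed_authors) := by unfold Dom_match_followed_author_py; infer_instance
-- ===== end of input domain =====

-- B inverts the traversal: it indexes each paper author's earliest position, then scans followed
-- authors and returns the one matching the minimal position; Pre_ excludes followed lists with
-- two distinct entries equal after lowercasing (there A's dict keeps the last, B the first).


-- ===== PORT A =====
-- followed_lower = {a.lower(): a for a in followed_authors}
def pvDictA (followed_authors : List String) : PySem.Dict String String :=
  followed_authors.foldl (fun d a => d.insert (PySem.Str.lower a) a) PySem.Dict.empty

-- the 'for author in paper_authors' loop: 'key in followed_lower' + 'followed_lower[key]'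
def pvLoopA (d : PySem.Dict String String) : List String → Option String
  | [] => none
  | author :: rest =>
    match d.get? (PySem.Str.strip (PySem.Str.lower author)) with
    | some v => some v
    | none => pvLoopA d rest

def match_followed_author_py (paper_authors : List String) (followed_authors : List String) : Option String :=
  pvLoopA (pvDictA followed_authors) paper_authors

-- ===== PORT B =====
-- 'for i, a in enumerate(paper_authors): pos.setdefault(a.lower().strip(), i)'
def pvPosLoop (d : PySem.Dict String Nat) (i : Nat) : List String → PySem.Dict String Nat
  | [] => d
  | a :: rest =>
    match d.get? (PySem.Str.strip (PySem.Str.lower a)) with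
    | some _ => pvPosLoop d (i + 1) rest
    | none => pvPosLoop (d.insert (PySem.Str.strip (PySem.Str.lower a)) i) (i + 1) rest

-- one step of the 'for f in followed_authors' loop: keep the candidate with the smaller position
def pvStepB (pos : PySem.Dict String Nat) (best : Option (Nat × String)) (f : String) : Option (Nat × String) :=
  match pos.get? (PySem.Str.lower f) with
  | none => best
  | some i =>
    match best with
    | none => some (i, f)
    | some (bi, bf) => if i < bi then some (i, f) else some (bi, bf)

def match_followed_author_py_alt (paper_authors : List String) (followed_authors : List String) : Option String :=
  let pos := pvPosLoop PySem.Dict.empty 0 paper_authors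
  (followed_authors.foldl (pvStepB pos) none).map Prod.snd

-- ===== PRECONDITION & SPEC =====
-- Pre_ excludes followed_authors lists containing two DISTINCT entries equal after lowercasing:
-- there A's dict comprehension keeps the LAST duplicate (an accident of dict re-insertion order)
-- while B keeps the first; either choice is defensible on that unspecified corner.
def Pre_match_followed_author_py (paper_authors : List String) (followed_authors : List String) : Prop :=
  followed_authors.Pairwise (fun a b => PySem.Str.lower a = PySem.Str.lower b → a = b)
instance (paper_authors : List String) (followed_authors : List String) : Decidable (Pre_match_followed_author_py paper_authors followed_authors) := by unfold Pre_match_followed_author_py; infer_instance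

def pvWitness_match_followed_author_py : List String × List String := (["Alice B."], ["ALICE B.", "Bob"])

def Spec_match_followed_author_py (paper_authors : List String) (followed_authors : List String) (out : Option String) : Prop := out = match_followed_author_py_alt paper_authors followed_authors
instance (paper_authors : List String) (followed_authors : List String) (out : Option String) : Decidable (Spec_match_followed_author_py paper_authors followed_authors out) := by unfold Spec_match_followed_author_py; infer_instance

-- ===== CLAIM (what is proved, stated in full; the proofs are below) =====
def Claim_equal_match_followed_author_py : Prop := ∀ (paper_authors : List String) (followed_authors : List String), Dom_match_followed_author_py paper_authors followed_authors → Pre_match_followed_author_py paper_authors followed_authors → Spec_match_followed_author_py paper_authors followed_authors (match_followed_author_py paper_authors followed_authors)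

-- ===== LEMMAS AND PROOFS =====

-- proof-side: index of the first key equal to fl
def pvFirstIdx : List String → String → Option Nat
  | [], _ => none
  | k :: rest, fl => if k = fl then some 0 else (pvFirstIdx rest fl).map (· + 1)

-- proof-side: B's step with the position dict replaced by first-index search over the keys
def pvStepI (keys : List String) (best : Option (Nat × String)) (f : String) : Option (Nat × String) :=
  match pvFirstIdx keys (PySem.Str.lower f) with
  | none => best
  | some i =>
    match best with
    | none => some (i, f)
    | some (bi, bf) => if i < bi then some (i, f) else some (bi, bf)

-- the setdefault loop computes the first index of each normalized key, offset by the counter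
theorem pv_posLoop_get (pa : List String) : ∀ (d : PySem.Dict String Nat) (i : Nat) (fl : String),
    (pvPosLoop d i pa).get? fl
      = (match d.get? fl with
         | some v => some v
         | none => (pvFirstIdx (pa.map (fun a => PySem.Str.strip (PySem.Str.lower a))) fl).map (· + i)) := by
  induction pa with
  | nil =>
    intro d i fl
    simp only [pvPosLoop, List.map_nil, pvFirstIdx, Option.map_none]
    cases d.get? fl <;> rfl
  | cons a rest ih =>
    intro d i fl
    simp only [List.map_cons]
    rw [pvFirstIdx]
    unfold pvPosLoop
    by_cases hk : PySem.Str.strip (PySem.Str.lower a) = fl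
    · rw [if_pos hk]
      cases hd : d.get? (PySem.Str.strip (PySem.Str.lower a)) with
      | some v =>
        rw [ih]
        rw [hk] at hd
        rw [hd]
      | none =>
        rw [ih]
        rw [PySem.Dict.get?_insert, if_pos hk.symm]
        rw [hk] at hd
        rw [hd]
        simp
    · rw [if_neg hk]
      cases hd : d.get? (PySem.Str.strip (PySem.Str.lower a)) with
      | some v =>
        rw [ih]
        cases hfl : d.get? fl with
        | some w => rfl
        | none =>
          rw [Option.map_map]
          have : ((fun x => x + i) ∘ (fun x => x + 1)) = (fun x => x + (i + 1)) := by
            funext j; simp; omega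
          rw [this]
      | none =>
        rw [ih]
        rw [PySem.Dict.get?_insert, if_neg (fun hh => hk hh.symm)]
        cases hfl : d.get? fl with
        | some w => rfl
        | none =>
          rw [Option.map_map]
          have : ((fun x => x + i) ∘ (fun x => x + 1)) = (fun x => x + (i + 1)) := by
            funext j; simp; omega
          rw [this]

-- B's dict-based step equals the first-index step once the dict is the position index
theorem pv_stepB_eq_stepI (pa : List String) :
    pvStepB (pvPosLoop PySem.Dict.empty 0 pa)
      = pvStepI (pa.map (fun a => PySem.Str.strip (PySem.Str.lower a))) := by
  funext best f
  unfold pvStepB pvStepI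
  rw [pv_posLoop_get]
  have h0 : (PySem.Dict.empty : PySem.Dict String Nat).get? (PySem.Str.lower f) = none := rfl
  rw [h0]
  simp only []
  cases pvFirstIdx (pa.map (fun a => PySem.Str.strip (PySem.Str.lower a))) (PySem.Str.lower f) with
  | none => rfl
  | some j => simp

-- A's dict lookup is the LAST followed author whose lowercase equals the key
theorem pv_get?_foldl_insert_lower (fs : List String) (d : PySem.Dict String String) (key : String) :
    (fs.foldl (fun d a => d.insert (PySem.Str.lower a) a) d).get? key
      = fs.foldl (fun best f => if PySem.Str.lower f = key then some f else best) (d.get? key) := by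
  induction fs generalizing d with
  | nil => rfl
  | cons a rest ih =>
    simp only [List.foldl_cons]
    rw [ih]
    congr 1
    rw [PySem.Dict.get?_insert]
    by_cases h : PySem.Str.lower a = key
    · simp [h]
    · rw [if_neg h, if_neg (fun hh => h hh.symm)]

-- the last-match fold keeps a value all later matches are equal to
theorem pv_lm_stable (k : String) (gs : List String) (g : String)
    (h : ∀ f ∈ gs, PySem.Str.lower f = k → f = g) :
    gs.foldl (fun best f => if PySem.Str.lower f = k then some f else best) (some g) = some g := by
  induction gs with
  | nil => rfl
  | cons f fs ih =>
    simp only [List.foldl_cons]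
    by_cases hf : PySem.Str.lower f = k
    · rw [if_pos hf, h f (by simp) hf]
      exact ih (fun x hx => h x (List.mem_cons_of_mem _ hx))
    · rw [if_neg hf]
      exact ih (fun x hx => h x (List.mem_cons_of_mem _ hx))

-- under Pre_, last match = first match
theorem pv_lm_eq_find (k : String) (fs : List String)
    (hp : fs.Pairwise (fun a b => PySem.Str.lower a = PySem.Str.lower b → a = b)) :
    fs.foldl (fun best f => if PySem.Str.lower f = k then some f else best) none
      = fs.find? (fun f => PySem.Str.lower f == k) := by
  induction fs with
  | nil => rfl
  | cons g gs ih =>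
    rw [List.pairwise_cons] at hp
    obtain ⟨hg, hgs⟩ := hp
    by_cases h : PySem.Str.lower g = k
    · simp only [List.foldl_cons, if_pos h, List.find?_cons]
      rw [pv_lm_stable k gs g (fun f hf hk => (hg f hf (by rw [h, hk])).symm)]
      simp [h]
    · simp only [List.foldl_cons, if_neg h, List.find?_cons]
      have : (PySem.Str.lower g == k) = false := by simp [h]
      rw [this]
      exact ih hgs

-- A's dict lookup, under Pre_, is the first matching followed author
theorem pv_dictA_find (fs : List String) (key : String)
    (hp : fs.Pairwise (fun a b => PySem.Str.lower a = PySem.Str.lower b → a = b)) :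
    (pvDictA fs).get? key = fs.find? (fun f => PySem.Str.lower f == key) := by
  unfold pvDictA
  rw [pv_get?_foldl_insert_lower]
  have h0 : (PySem.Dict.empty : PySem.Dict String String).get? key = none := rfl
  rw [h0, pv_lm_eq_find _ _ hp]

-- once the best candidate sits at position 0 it can never be replaced
theorem pv_stepI_absorb (keys : List String) (fs : List String) (f0 : String) :
    fs.foldl (pvStepI keys) (some (0, f0)) = some (0, f0) := by
  induction fs with
  | nil => rfl
  | cons g gs ih =>
    simp only [List.foldl_cons]
    have : pvStepI keys (some (0, f0)) g = some (0, f0) := by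
      unfold pvStepI
      cases pvFirstIdx keys (PySem.Str.lower g) with
      | none => rfl
      | some i => simp
    rw [this]; exact ih

-- if the first key is hit by some follower, the fold ends at the FIRST such follower
theorem pv_stepI_hit (k : String) (rest : List String) (fs : List String) (f0 : String)
    (hf : fs.find? (fun f => PySem.Str.lower f == k) = some f0) :
    ∀ b : Option (Nat × String), (∀ j g, b = some (j, g) → 0 < j) →
      fs.foldl (pvStepI (k :: rest)) b = some (0, f0) := by
  induction fs with
  | nil => simp at hf
  | cons g gs ih =>
    intro b hb
    rw [List.find?_cons] at hf
    by_cases h : PySem.Str.lower g = k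
    · have hgk : (PySem.Str.lower g == k) = true := by simp [h]
      rw [hgk] at hf
      injection hf with hf0
      subst hf0
      simp only [List.foldl_cons]
      have hidx : pvFirstIdx (k :: rest) (PySem.Str.lower g) = some 0 := by
        rw [pvFirstIdx]; rw [if_pos h.symm]
      have : pvStepI (k :: rest) b g = some (0, g) := by
        unfold pvStepI
        rw [hidx]
        cases b with
        | none => rfl
        | some p =>
          obtain ⟨j, gg⟩ := p
          have := hb j gg rfl
          simp [this]
      rw [this]
      exact pv_stepI_absorb _ _ _
    · have hgk : (PySem.Str.lower g == k) = false := by simp [h]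
      rw [hgk] at hf
      simp only [List.foldl_cons]
      apply ih hf
      intro j gg hj
      unfold pvStepI at hj
      have hidx : pvFirstIdx (k :: rest) (PySem.Str.lower g)
          = (pvFirstIdx rest (PySem.Str.lower g)).map (· + 1) := by
        rw [pvFirstIdx]; rw [if_neg (fun hh => h hh.symm)]
      rw [hidx] at hj
      cases hri : pvFirstIdx rest (PySem.Str.lower g) with
      | none => rw [hri] at hj; simp at hj; exact hb j gg hj
      | some i =>
        rw [hri] at hj
        simp only [Option.map_some] at hj
        cases b with
        | none => simp at hj; omega
        | some p =>
          obtain ⟨bi, bf⟩ := p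
          have hbi := hb bi bf rfl
          simp only at hj
          split at hj
          · injection hj with hj1; injection hj1 with hji _; omega
          · injection hj with hj1; injection hj1 with hji _; omega

-- if no follower hits the first key, the fold over (k :: rest) is the fold over rest shifted by one
theorem pv_stepI_miss (k : String) (rest : List String) (fs : List String)
    (h : ∀ f ∈ fs, PySem.Str.lower f ≠ k) (b : Option (Nat × String)) :
    fs.foldl (pvStepI (k :: rest)) (b.map (fun p => (p.1 + 1, p.2)))
      = (fs.foldl (pvStepI rest) b).map (fun p => (p.1 + 1, p.2)) := by
  induction fs generalizing b with
  | nil => rfl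
  | cons g gs ih =>
    simp only [List.foldl_cons]
    have hstep : pvStepI (k :: rest) (b.map (fun p => (p.1 + 1, p.2))) g
        = (pvStepI rest b g).map (fun p => (p.1 + 1, p.2)) := by
      unfold pvStepI
      have hidx : pvFirstIdx (k :: rest) (PySem.Str.lower g)
          = (pvFirstIdx rest (PySem.Str.lower g)).map (· + 1) := by
        rw [pvFirstIdx]; rw [if_neg (fun hh => (h g (by simp)) hh.symm)]
      rw [hidx]
      cases pvFirstIdx rest (PySem.Str.lower g) with
      | none => rfl
      | some i =>
        cases b with
        | none => rfl
        | some p =>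
          obtain ⟨bi, bf⟩ := p
          simp only [Option.map_some]
          by_cases hlt : i < bi
          · rw [if_pos hlt, if_pos (by omega : i + 1 < bi + 1)]; rfl
          · rw [if_neg hlt, if_neg (by omega : ¬ i + 1 < bi + 1)]; rfl
    rw [hstep]
    exact ih (fun f hf => h f (List.mem_cons_of_mem _ hf)) _

-- with no keys, the fold never changes the accumulator
theorem pv_stepI_nil (fs : List String) (b : Option (Nat × String)) :
    fs.foldl (pvStepI []) b = b := by
  induction fs generalizing b with
  | nil => rfl
  | cons g gs ih =>
    simp only [List.foldl_cons]
    have : pvStepI [] b g = b := by unfold pvStepI pvFirstIdx; rfl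
    rw [this]; exact ih _

-- core (empty keys): B returns none
theorem pv_core_nil (fs : List String) :
    (fs.foldl (pvStepI []) none).map Prod.snd = none := by
  rw [pv_stepI_nil]; rfl

-- core: first-match scan over the keys equals B's minimal-position fold over the followers
theorem pv_core_cons (fs : List String) (k : String) (rest : List String) :
    (fs.foldl (pvStepI (k :: rest)) none).map Prod.snd
      = (match fs.find? (fun f => PySem.Str.lower f == k) with
         | some f => some f
         | none => (fs.foldl (pvStepI rest) none).map Prod.snd) := by
  cases hf : fs.find? (fun f => PySem.Str.lower f == k) with
  | some f0 =>
    rw [pv_stepI_hit k rest fs f0 hf none (by intro j g hj; simp at hj)]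
    rfl
  | none =>
    have hnone : ∀ f ∈ fs, PySem.Str.lower f ≠ k := by
      intro f hfmem heq
      have := List.find?_eq_none.mp hf f hfmem
      simp [heq] at this
    have := pv_stepI_miss k rest fs hnone none
    simp only [Option.map_none] at this
    rw [this]
    cases fs.foldl (pvStepI rest) none with
    | none => rfl
    | some p => rfl

-- ===== VERDICT (by name: the statement is the Claim_ definition above) =====
theorem match_followed_author_py_spec : Claim_equal_match_followed_author_py := by
  intro paper_authors followed_authors hdom hpre
  unfold Spec_match_followed_author_py match_followed_author_py match_followed_author_py_alt
  clear hdom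
  unfold Pre_match_followed_author_py at hpre
  show pvLoopA (pvDictA followed_authors) paper_authors
      = (followed_authors.foldl
          (pvStepB (pvPosLoop PySem.Dict.empty 0 paper_authors)) none).map Prod.snd
  rw [pv_stepB_eq_stepI]
  induction paper_authors with
  | nil =>
    simp only [List.map_nil]
    rw [pv_core_nil]
    rfl
  | cons author rest ih =>
    simp only [List.map_cons]
    rw [pv_core_cons]
    unfold pvLoopA
    rw [pv_dictA_find followed_authors _ hpre]
    cases followed_authors.find?
        (fun f => PySem.Str.lower f == PySem.Str.strip (PySem.Str.lower author)) with
    | none => exact ih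
    | some v => rfl
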